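-- pv_equiv track=rewrite | github.com/dexterex-02/Coding | Python/Test/test3.py | countWaysToCompleteGame
-- ===== SOURCE A (Python) =====
-- def countWaysToCompleteGame(N, P, X):
--     # Initialize a 2D array to store the number of ways for each player and each move
--     dp = [[0] * (N + 1) for _ in range(X + 1)]
--
--     # For each move (0 to X) and each player (1 to N), set the base case
--     for i in range(1, N + 1):
--         dp[0][i] = 1
--
--     # Fill the dp array using dynamic programming
--     for move in range(1, X + 1):
--         for player in range(1, N + 1):
--             dp[move][player] = 0
--             for other_player in range(1, N + 1):
--                 if player != other_player and (player % other_player == 0 or other_player % player == 0):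
--                     dp[move][player] += dp[move - 1][other_player]
--
--     return dp[X][P]
-- ===== SOURCE B (Python) =====
-- def countWaysToCompleteGame(N, P, X):
--     # Sieve / Dirichlet-transform reformulation: one move maps v to T + U - 2*v,
--     # where T[p] = sum of v over all divisors of p and U[p] = sum of v over all
--     # multiples of p (both include p itself, hence the -2*v[p] correction); T and
--     # U are built by walking arithmetic progressions, with no pairwise
--     # divisibility tests and no 2-D table.
--     v = [0] + [1] * N
--     for _ in range(X):
--         T = [0] * (N + 1)
--         U = [0] * (N + 1)
--         for d in range(1, N + 1):
--             for m in range(d, N + 1, d):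
--                 T[m] += v[d]
--                 U[d] += v[m]
--         v = [0] + [T[p] + U[p] - 2 * v[p] for p in range(1, N + 1)]
--     return v[P]
-- ===== Notes on version B (the rewrite author's own statement) =====
-- stated objective: faster
-- what changed: B replaces A's per-pair divisibility-tested triple loop over a full (X+1)x(N+1) table by a sieve/Dirichlet-transform move on a single rolling vector: each move builds divisor-sums T and multiple-sums U by walking arithmetic progressions d, 2d, 3d, ... and sets new v[p] = T[p] + U[p] - 2*v[p], with no pairwise divisibility tests and no 2-D table; O(X*N log N) vs O(X*N^2).
import Mathlib
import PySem

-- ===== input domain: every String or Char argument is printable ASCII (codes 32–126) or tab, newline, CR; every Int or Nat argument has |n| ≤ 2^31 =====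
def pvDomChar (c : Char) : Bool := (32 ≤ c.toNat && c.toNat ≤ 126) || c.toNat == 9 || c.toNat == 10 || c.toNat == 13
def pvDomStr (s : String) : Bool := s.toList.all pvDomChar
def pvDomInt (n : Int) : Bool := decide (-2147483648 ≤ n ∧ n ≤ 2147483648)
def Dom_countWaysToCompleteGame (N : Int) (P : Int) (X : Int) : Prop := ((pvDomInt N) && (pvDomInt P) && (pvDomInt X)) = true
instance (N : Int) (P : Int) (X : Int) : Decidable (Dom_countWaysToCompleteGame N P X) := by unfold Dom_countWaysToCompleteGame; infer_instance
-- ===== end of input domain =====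

-- B replaces A's pair-tested triple-loop DP table by a sieve move on one rolling
-- vector: divisor-sums and multiple-sums built by walking arithmetic progressions.

-- ===== PORT A =====
-- the divisibility condition 'player != other and (player % other == 0 or other % player == 0)'
def pvCond (player other : Int) : Bool :=
  decide (player ≠ other) && (PySem.Int.mod player other == 0 || PySem.Int.mod other player == 0)

-- dp[i][j] read; exact for the in-range indices Pre_ and the loops produce
def pvGet2 (dp : List (List Int)) (i j : Int) : Int :=
  PySem.List.pyGetD (PySem.List.pyGetD dp i []) j 0

-- dp[i][j] = v; exact for the in-range indices the loops produce
def pvSet2 (dp : List (List Int)) (i j : Int) (v : Int) : List (List Int) :=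
  PySem.List.pySetD dp i (PySem.List.pySetD (PySem.List.pyGetD dp i []) j v)

def countWaysToCompleteGame (N : Int) (P : Int) (X : Int) : Int :=
  -- dp = [[0] * (N + 1) for _ in range(X + 1)]
  let dp0 := (PySem.List.pyRange 0 (X+1) 1).map (fun _ => List.replicate (N+1).toNat (0:Int))
  -- for i in range(1, N + 1): dp[0][i] = 1
  let dp1 := (PySem.List.pyRange 1 (N+1) 1).foldl (fun dp i => pvSet2 dp 0 i 1) dp0
  -- for move …: for player …: dp[move][player] = 0; for other_player …: if …: dp[move][player] += dp[move-1][other_player]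
  let dp2 := (PySem.List.pyRange 1 (X+1) 1).foldl (fun dp move =>
    (PySem.List.pyRange 1 (N+1) 1).foldl (fun dp player =>
      (PySem.List.pyRange 1 (N+1) 1).foldl (fun dp other =>
        if pvCond player other
        then pvSet2 dp move player (pvGet2 dp move player + pvGet2 dp (move-1) other)
        else dp) (pvSet2 dp move player 0)) dp) dp1
  pvGet2 dp2 X P

-- ===== PORT B =====
-- one move: T[p] = sum of v over divisors of p, U[p] = sum of v over multiples of p,
-- built by walking arithmetic progressions; new v[p] = T[p] + U[p] - 2*v[p]
def pvMoveB (N : Int) (v : List Int) : List Int :=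
  -- T = [0] * (N + 1); U = [0] * (N + 1)
  -- for d in range(1, N + 1):
  --   for m in range(d, N + 1, d): T[m] += v[d]; U[d] += v[m]
  let TU := (PySem.List.pyRange 1 (N+1) 1).foldl (fun TU d =>
      (PySem.List.pyRange d (N+1) d).foldl (fun TU m =>
        (PySem.List.pySetD TU.1 m (PySem.List.pyGetD TU.1 m 0 + PySem.List.pyGetD v d 0),
         PySem.List.pySetD TU.2 d (PySem.List.pyGetD TU.2 d 0 + PySem.List.pyGetD v m 0))) TU)
    (List.replicate (N+1).toNat (0:Int), List.replicate (N+1).toNat (0:Int))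
  -- v = [0] + [T[p] + U[p] - 2 * v[p] for p in range(1, N + 1)]
  (0:Int) :: (PySem.List.pyRange 1 (N+1) 1).map (fun p =>
    PySem.List.pyGetD TU.1 p 0 + PySem.List.pyGetD TU.2 p 0 - 2 * PySem.List.pyGetD v p 0)

def countWaysToCompleteGame_alt (N : Int) (P : Int) (X : Int) : Int :=
  -- v = [0] + [1] * N; for _ in range(X): one sieve move
  let v := (PySem.List.pyRange 0 X 1).foldl (fun v _ => pvMoveB N v)
    ((0:Int) :: List.replicate N.toNat 1)
  PySem.List.pyGetD v P 0   -- return v[P]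

-- ===== PRECONDITION & SPEC =====
-- Pre_ is exactly where the Python A returns: N ≥ 0 and X ≥ 0 (else the table is empty
-- where indexed) and P a valid (possibly negative, Python-style) index into a row.
def Pre_countWaysToCompleteGame (N : Int) (P : Int) (X : Int) : Prop :=
  0 ≤ N ∧ 0 ≤ X ∧ -(N+1) ≤ P ∧ P ≤ N
instance (N : Int) (P : Int) (X : Int) : Decidable (Pre_countWaysToCompleteGame N P X) := by
  unfold Pre_countWaysToCompleteGame; infer_instance

def pvWitness_countWaysToCompleteGame : Int × Int × Int := (3, 2, 2)

def Spec_countWaysToCompleteGame (N : Int) (P : Int) (X : Int) (out : Int) : Prop := out = countWaysToCompleteGame_alt N P X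
instance (N : Int) (P : Int) (X : Int) (out : Int) : Decidable (Spec_countWaysToCompleteGame N P X out) := by unfold Spec_countWaysToCompleteGame; infer_instance

-- ===== CLAIM (what is proved, stated in full; the proofs are below) =====
def Claim_equal_countWaysToCompleteGame : Prop := ∀ (N : Int) (P : Int) (X : Int), Dom_countWaysToCompleteGame N P X → Pre_countWaysToCompleteGame N P X → Spec_countWaysToCompleteGame N P X (countWaysToCompleteGame N P X)

-- ===== LEMMAS AND PROOFS =====

-- ---- shared abstract layer: the move step on rows ----

-- the common move step: new row, entry p = sum of the previous row over p's divisibility neighbours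
def stepRow (N : Int) (prev : List Int) : List Int :=
  0 :: (PySem.List.pyRange 1 (N+1) 1).map (fun p =>
    (((PySem.List.pyRange 1 (N+1) 1).filter (fun q => pvCond p q)).map
      (fun q => PySem.List.pyGetD prev q 0)).sum)

-- the row after m moves
def rows (N : Int) : Nat → List Int
  | 0 => 0 :: List.replicate N.toNat 1
  | m+1 => stepRow N (rows N m)

-- A's table after the moves 1..m have been filled in (x+1 rows in total)
def tableA (N : Int) (x m : Nat) : List (List Int) :=
  (List.range (x+1)).map (fun k => if k ≤ m then rows N k else List.replicate (N.toNat+1) 0)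

lemma length_stepRow (N : Int) (prev : List Int) : (stepRow N prev).length = N.toNat + 1 := by
  simp [stepRow, PySem.List.length_pyRange_one]

-- ---- A-side lemmas ----

lemma pvGet2_pvSet2_same (dp : List (List Int)) (i : Nat) (j v : Int)
    (hi : i < dp.length) (hj : 0 ≤ j) (hjl : j.toNat < (dp.getD i []).length) :
    pvGet2 (pvSet2 dp (i:Int) j v) (i:Int) j = v := by
  unfold pvGet2 pvSet2
  rw [PySem.List.pyGetD_pySetD_natCast _ _ _ _ _ hi, if_pos rfl]
  have hjc : j = ((j.toNat : Nat) : Int) := by omega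
  rw [hjc, PySem.List.pyGetD_natCast, PySem.List.pySetD_natCast]
  rw [List.getD_eq_getElem _ _ (by simp [PySem.List.pyGetD_natCast]; exact hjl)]
  simp

lemma pvGet2_pvSet2_other_row (dp : List (List Int)) (i i' : Nat) (j q v : Int)
    (hi : i < dp.length) (hne : i' ≠ i) :
    pvGet2 (pvSet2 dp (i:Int) j v) (i':Int) q = pvGet2 dp (i':Int) q := by
  unfold pvGet2 pvSet2
  rw [PySem.List.pyGetD_pySetD_natCast _ _ _ _ _ hi, if_neg hne]

lemma pvSet2_pvSet2_same (dp : List (List Int)) (i : Nat) (j v w : Int)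
    (hi : i < dp.length) (hj : 0 ≤ j) :
    pvSet2 (pvSet2 dp (i:Int) j v) (i:Int) j w = pvSet2 dp (i:Int) j w := by
  unfold pvSet2
  rw [PySem.List.pyGetD_pySetD_natCast _ _ _ _ _ hi, if_pos rfl]
  have h1 : PySem.List.pySetD (PySem.List.pySetD (PySem.List.pyGetD dp (i:Int) []) j v) j w
      = PySem.List.pySetD (PySem.List.pyGetD dp (i:Int) []) j w := by
    rw [PySem.List.pySetD_of_nonneg _ _ hj, PySem.List.pySetD_of_nonneg _ _ hj,
      PySem.List.pySetD_of_nonneg _ _ hj, List.set_set]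
  rw [h1, PySem.List.pySetD_natCast, PySem.List.pySetD_natCast, PySem.List.pySetD_natCast,
    List.set_set]

lemma length_pvSet2 (dp : List (List Int)) (i j v : Int) :
    (pvSet2 dp i j v).length = dp.length := by
  unfold pvSet2; rw [PySem.List.length_pySetD]

lemma row_length_pvSet2 (dp : List (List Int)) (i : Nat) (j v : Int) (hi : i < dp.length) :
    ((pvSet2 dp (i:Int) j v).getD i []).length = (dp.getD i []).length := by
  unfold pvSet2
  rw [PySem.List.pySetD_natCast]
  rw [List.getD_eq_getElem _ _ (by simpa using hi), List.getElem_set_self,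
    PySem.List.length_pySetD, PySem.List.pyGetD_natCast]

lemma pvSet2_eq_self (dp : List (List Int)) (i : Nat) (j : Int) (hi : i < dp.length)
    (hj : 0 ≤ j) (hjl : j.toNat < (dp.getD i []).length) :
    pvSet2 dp (i:Int) j (pvGet2 dp (i:Int) j) = dp := by
  unfold pvSet2 pvGet2
  rw [PySem.List.pyGetD_natCast, PySem.List.pySetD_natCast,
    PySem.List.pySetD_of_nonneg _ _ hj, PySem.List.pyGetD_of_nonneg _ _ hj]
  rw [List.getD_eq_getElem _ _ hi, List.getD_eq_getElem _ _ (by rwa [List.getD_eq_getElem _ _ hi] at hjl)]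
  rw [List.set_getElem_self, List.set_getElem_self]

lemma innerLoop (L : List Int) (dp : List (List Int)) (i : Nat) (player : Int)
    (h1 : 1 ≤ i) (hi : i < dp.length) (hp : 0 ≤ player)
    (hpl : player.toNat < (dp.getD i []).length) :
    L.foldl (fun dp other =>
        if pvCond player other
        then pvSet2 dp (i:Int) player (pvGet2 dp (i:Int) player + pvGet2 dp ((i:Int)-1) other)
        else dp) dp
    = pvSet2 dp (i:Int) player (pvGet2 dp (i:Int) player +
        ((L.filter (fun q => pvCond player q)).map
          (fun q => pvGet2 dp ((i:Int)-1) q)).sum) := by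
  induction L generalizing dp with
  | nil =>
    simp only [List.foldl_nil, List.filter_nil, List.map_nil, List.sum_nil, add_zero]
    rw [pvSet2_eq_self dp i player hi hp hpl]
  | cons q L ih =>
    simp only [List.foldl_cons]
    by_cases hc : pvCond player q
    · rw [if_pos hc]
      set dp' := pvSet2 dp (i:Int) player (pvGet2 dp (i:Int) player + pvGet2 dp ((i:Int)-1) q) with hdp'
      have hi' : i < dp'.length := by rw [hdp', length_pvSet2]; exact hi
      have hpl' : player.toNat < (dp'.getD i []).length := by
        rw [hdp', row_length_pvSet2 _ _ _ _ hi]; exact hpl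
      rw [ih dp' hi' hpl']
      have hprev : ∀ r, pvGet2 dp' ((i:Int)-1) r = pvGet2 dp ((i:Int)-1) r := by
        intro r
        have hcast : (i:Int) - 1 = ((i-1 : Nat) : Int) := by omega
        rw [hdp', hcast, pvGet2_pvSet2_other_row dp i (i-1) player r _ hi (by omega)]
      have hsame : pvGet2 dp' (i:Int) player
          = pvGet2 dp (i:Int) player + pvGet2 dp ((i:Int)-1) q := by
        rw [hdp', pvGet2_pvSet2_same dp i player _ hi hp hpl]
      have hmap : (L.filter (fun r => pvCond player r)).map (fun r => pvGet2 dp' ((i:Int)-1) r)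
          = (L.filter (fun r => pvCond player r)).map (fun r => pvGet2 dp ((i:Int)-1) r) := by
        apply List.map_congr_left; intro r _; exact hprev r
      rw [hmap, hsame, hdp', pvSet2_pvSet2_same dp i player _ _ hi hp]
      rw [List.filter_cons_of_pos hc, List.map_cons, List.sum_cons]
      ring_nf
    · rw [if_neg hc, ih dp hi hpl, List.filter_cons_of_neg hc]

lemma getD_pySetD_self (dp : List (List Int)) (i : Nat) (r : List Int) (hi : i < dp.length) :
    (PySem.List.pySetD dp (i:Int) r).getD i [] = r := by
  have := PySem.List.pyGetD_pySetD_natCast dp i i r [] hi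
  rwa [if_pos rfl, PySem.List.pyGetD_natCast] at this

lemma getD_pySetD_ne (dp : List (List Int)) (i i' : Nat) (r : List Int)
    (hi : i < dp.length) (hne : i' ≠ i) :
    (PySem.List.pySetD dp (i:Int) r).getD i' [] = dp.getD i' [] := by
  have := PySem.List.pyGetD_pySetD_natCast dp i i' r [] hi
  rwa [if_neg hne, PySem.List.pyGetD_natCast, PySem.List.pyGetD_natCast] at this

lemma pvSet2_eq_set (dp : List (List Int)) (i : Nat) (player v : Int) (hp : 0 ≤ player) :
    pvSet2 dp (i:Int) player v
      = PySem.List.pySetD dp (i:Int) ((dp.getD i []).set player.toNat v) := by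
  unfold pvSet2
  rw [PySem.List.pyGetD_natCast, PySem.List.pySetD_of_nonneg _ _ hp]

lemma pySetD_pySetD_self (dp : List (List Int)) (i : Nat) (r s : List Int) :
    PySem.List.pySetD (PySem.List.pySetD dp (i:Int) r) (i:Int) s = PySem.List.pySetD dp (i:Int) s := by
  rw [PySem.List.pySetD_natCast, PySem.List.pySetD_natCast, PySem.List.pySetD_natCast, List.set_set]

lemma playerLoop (N : Int) (hN : 0 ≤ N) (prev : List Int) (i : Nat) (h1 : 1 ≤ i)
    (k : Nat) : ∀ (a : Nat) (dp : List (List Int)), a + k = N.toNat →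
    i < dp.length →
    dp.getD (i-1) [] = prev →
    dp.getD i [] = (stepRow N prev).take (a+1) ++ List.replicate (N.toNat - a) 0 →
    (PySem.List.pyRange ((a:Int)+1) (N+1) 1).foldl (fun dp player =>
      (PySem.List.pyRange 1 (N+1) 1).foldl (fun dp other =>
        if pvCond player other
        then pvSet2 dp (i:Int) player (pvGet2 dp (i:Int) player + pvGet2 dp ((i:Int)-1) other)
        else dp) (pvSet2 dp (i:Int) player 0)) dp
    = PySem.List.pySetD dp (i:Int) (stepRow N prev) := by
  induction k with
  | zero =>
    intro a dp ha hi hprev hrow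
    rw [PySem.List.pyRange_one_eq_nil (a := (a:Int)+1) (b := N+1) (by omega), List.foldl_nil]
    have hfull : (stepRow N prev).take (a+1) ++ List.replicate (N.toNat - a) 0 = stepRow N prev := by
      have hz : N.toNat - a = 0 := by omega
      rw [hz, List.replicate_zero, List.append_nil,
        List.take_of_length_le (by rw [length_stepRow]; omega)]
    have hrow' : dp.getD i [] = stepRow N prev := by rw [hrow, hfull]
    rw [← hrow', PySem.List.pySetD_natCast, List.getD_eq_getElem _ _ hi, List.set_getElem_self]
  | succ k ih =>
    intro a dp ha hi hprev hrow
    have han : a < N.toNat := by omega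
    have hcons : PySem.List.pyRange ((a:Int)+1) (N+1) 1
        = ((a:Int)+1) :: PySem.List.pyRange (((a+1:Nat):Int)+1) (N+1) 1 := by
      rw [PySem.List.pyRange_one_cons (a := (a:Int)+1) (b := N+1) (by omega)]
      norm_cast
    rw [hcons, List.foldl_cons]
    set player : Int := (a:Int)+1 with hplayer
    have hp0 : (0:Int) ≤ player := by omega
    have hptn : player.toNat = a + 1 := by omega
    have hrowlen : (dp.getD i []).length = N.toNat + 1 := by
      rw [hrow, List.length_append, List.length_take, List.length_replicate, length_stepRow]
      omega
    have hpl : player.toNat < (dp.getD i []).length := by omega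
    set dp0 := pvSet2 dp (i:Int) player 0 with hdp0
    have hi0 : i < dp0.length := by rw [hdp0, length_pvSet2]; exact hi
    have hpl0 : player.toNat < (dp0.getD i []).length := by
      rw [hdp0, row_length_pvSet2 _ _ _ _ hi]; exact hpl
    rw [innerLoop _ dp0 i player h1 hi0 hp0 hpl0]
    have hcast : (i:Int) - 1 = ((i-1 : Nat) : Int) := by omega
    have hzero : pvGet2 dp0 (i:Int) player = 0 := pvGet2_pvSet2_same dp i player 0 hi hp0 hpl
    have hprev0 : ∀ q, pvGet2 dp0 ((i:Int)-1) q = PySem.List.pyGetD prev q 0 := by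
      intro q
      rw [hdp0, hcast, pvGet2_pvSet2_other_row dp i (i-1) player q _ hi (by omega)]
      unfold pvGet2
      rw [PySem.List.pyGetD_natCast, hprev]
    have hmap : ((PySem.List.pyRange 1 (N+1) 1).filter (fun q => pvCond player q)).map
          (fun q => pvGet2 dp0 ((i:Int)-1) q)
        = ((PySem.List.pyRange 1 (N+1) 1).filter (fun q => pvCond player q)).map
          (fun q => PySem.List.pyGetD prev q 0) := by
      apply List.map_congr_left; intro q _; exact hprev0 q
    rw [hmap, hzero, hdp0, pvSet2_pvSet2_same dp i player _ _ hi hp0, zero_add]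
    set v : Int := (((PySem.List.pyRange 1 (N+1) 1).filter (fun q => pvCond player q)).map
      (fun q => PySem.List.pyGetD prev q 0)).sum with hv
    have hstep_get : (stepRow N prev)[a+1]? = some v := by
      unfold stepRow
      rw [List.getElem?_cons_succ, List.getElem?_map]
      have hidx : (PySem.List.pyRange 1 (N+1) 1)[a]? = some (1 + (a:Int)) := by
        rw [List.getElem?_eq_getElem (by rw [PySem.List.length_pyRange_one]; omega),
          PySem.List.getElem_pyRange_one]
      rw [hidx, Option.map_some]
      have h1a : (1:Int) + (a:Int) = player := by rw [hplayer]; ring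
      rw [h1a]
    set dp1 := pvSet2 dp (i:Int) player v with hdp1
    have hi1 : i < dp1.length := by rw [hdp1, length_pvSet2]; exact hi
    have hprev1 : dp1.getD (i-1) [] = prev := by
      rw [hdp1, pvSet2_eq_set dp i player v hp0, getD_pySetD_ne dp i (i-1) _ hi (by omega), hprev]
    have hrow1 : dp1.getD i [] = (stepRow N prev).take (a+1+1) ++ List.replicate (N.toNat - (a+1)) 0 := by
      rw [hdp1, pvSet2_eq_set dp i player v hp0, getD_pySetD_self dp i _ hi, hrow, hptn]
      rw [List.set_append]
      have hlt : (stepRow N prev).length = N.toNat + 1 := length_stepRow N prev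
      have hlen : ((stepRow N prev).take (a+1)).length = a+1 := by
        rw [List.length_take]; omega
      rw [if_neg (by omega), hlen, Nat.sub_self]
      obtain ⟨t, ht1, ht2⟩ : ∃ t, N.toNat - a = t + 1 ∧ N.toNat - (a+1) = t :=
        ⟨N.toNat - a - 1, by omega, by omega⟩
      rw [ht1, ht2, List.replicate_succ, List.set_cons_zero]
      rw [show List.take (a+1+1) (stepRow N prev)
            = List.take (a+1) (stepRow N prev) ++ ((stepRow N prev)[a+1]?).toList from
          List.take_add_one, hstep_get]
      rw [List.append_assoc]
      rfl
    rw [ih (a+1) dp1 (by omega) hi1 hprev1 hrow1]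
    rw [hdp1, pvSet2_eq_set dp i player v hp0, pySetD_pySetD_self]

lemma initRow (N : Int) (hN : 0 ≤ N)
    (k : Nat) : ∀ (a : Nat), a + k = N.toNat →
    (PySem.List.pyRange ((a:Int)+1) (N+1) 1).foldl (fun r i => PySem.List.pySetD r i 1)
      ((0:Int) :: (List.replicate a 1 ++ List.replicate (N.toNat - a) 0))
    = (0:Int) :: List.replicate N.toNat 1 := by
  induction k with
  | zero =>
    intro a ha
    rw [PySem.List.pyRange_one_eq_nil (a := (a:Int)+1) (b := N+1) (by omega), List.foldl_nil]
    rw [show N.toNat - a = 0 from by omega, List.replicate_zero, List.append_nil,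
      show a = N.toNat from by omega]
  | succ k ih =>
    intro a ha
    rw [PySem.List.pyRange_one_cons (a := (a:Int)+1) (b := N+1) (by omega)]
    norm_cast
    rw [List.foldl_cons]
    have hset : PySem.List.pySetD ((0:Int) :: (List.replicate a 1 ++ List.replicate (N.toNat - a) 0))
        (((a+1:Nat)):Int) 1
        = (0:Int) :: (List.replicate (a+1) 1 ++ List.replicate (N.toNat - (a+1)) 0) := by
      rw [PySem.List.pySetD_of_nonneg _ _ (by omega)]
      rw [show (((a+1:Nat):Int)).toNat = a+1 from by omega]
      rw [List.set_cons_succ, List.set_append, if_neg (by simp), List.length_replicate,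
        Nat.sub_self]
      obtain ⟨t, ht1, ht2⟩ : ∃ t, N.toNat - a = t + 1 ∧ N.toNat - (a+1) = t :=
        ⟨N.toNat - a - 1, by omega, by omega⟩
      rw [ht1, ht2, List.replicate_succ, List.set_cons_zero]
      rw [List.replicate_succ' (n := a), List.append_assoc]
      rfl
    rw [hset]
    exact ih (a+1) (by omega)

lemma foldl_head_set (L : List Int) (r0 : List Int) (rest : List (List Int)) :
    L.foldl (fun dp i => pvSet2 dp 0 i 1) (r0 :: rest)
    = (L.foldl (fun r i => PySem.List.pySetD r i 1) r0) :: rest := by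
  induction L generalizing r0 with
  | nil => rfl
  | cons x L ih =>
    rw [List.foldl_cons, List.foldl_cons]
    have h : pvSet2 (r0 :: rest) 0 x 1 = (PySem.List.pySetD r0 x 1) :: rest := by
      unfold pvSet2
      rw [PySem.List.pyGetD_zero_cons, PySem.List.pySetD_of_nonneg _ _ (by norm_num)]
      rfl
    rw [h, ih]

lemma tableA_getD (N : Int) (x m k : Nat) (hk : k ≤ x) :
    (tableA N x m).getD k [] = if k ≤ m then rows N k else List.replicate (N.toNat+1) 0 := by
  unfold tableA
  rw [List.getD_eq_getElem _ _ (by simp [List.length_range]; omega), List.getElem_map,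
    List.getElem_range]

lemma set_tableA (N : Int) (x m : Nat) :
    PySem.List.pySetD (tableA N x m) ((m+1 : Nat) : Int) (stepRow N (rows N m))
    = tableA N x (m+1) := by
  rw [PySem.List.pySetD_natCast]
  apply List.ext_getElem
  · simp [tableA]
  · intro t ht1 ht2
    simp only [tableA, List.length_set, List.length_map, List.length_range] at ht1 ht2 ⊢
    rw [List.getElem_set]
    by_cases hcase : m + 1 = t
    · rw [if_pos hcase, List.getElem_map, List.getElem_range, if_pos (by omega), ← hcase]
      rfl
    · rw [if_neg hcase, List.getElem_map, List.getElem_map, List.getElem_range]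
      have : (t ≤ m) ↔ (t ≤ m + 1) := by omega
      by_cases h2 : t ≤ m
      · rw [if_pos h2, if_pos (by omega)]
      · rw [if_neg h2, if_neg (by omega)]

lemma moveLoop (N X : Int) (hN : 0 ≤ N) (hX : 0 ≤ X)
    (k : Nat) : ∀ (m : Nat), m + k = X.toNat →
    (PySem.List.pyRange ((m:Int)+1) (X+1) 1).foldl (fun dp move =>
      (PySem.List.pyRange 1 (N+1) 1).foldl (fun dp player =>
        (PySem.List.pyRange 1 (N+1) 1).foldl (fun dp other =>
          if pvCond player other
          then pvSet2 dp move player (pvGet2 dp move player + pvGet2 dp (move-1) other)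
          else dp) (pvSet2 dp move player 0)) dp) (tableA N X.toNat m)
    = tableA N X.toNat X.toNat := by
  induction k with
  | zero =>
    intro m hm
    rw [PySem.List.pyRange_one_eq_nil (a := (m:Int)+1) (b := X+1) (by omega), List.foldl_nil,
      show m = X.toNat from by omega]
  | succ k ih =>
    intro m hm
    rw [PySem.List.pyRange_one_cons (a := (m:Int)+1) (b := X+1) (by omega)]
    norm_cast
    rw [List.foldl_cons]
    have hpl := playerLoop N hN (rows N m) (m+1) (by omega) N.toNat 0 (tableA N X.toNat m)
      (by omega)
      (by simp [tableA, List.length_range]; omega)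
      (by rw [Nat.add_sub_cancel, tableA_getD N X.toNat m m (by omega), if_pos (le_refl m)])
      (by rw [tableA_getD N X.toNat m (m+1) (by omega), if_neg (by omega)]
          show List.replicate (N.toNat+1) 0 = (stepRow N (rows N m)).take 1 ++ List.replicate (N.toNat - 0) 0
          rw [show (stepRow N (rows N m)).take 1 = [0] from rfl, Nat.sub_zero, List.replicate_succ]
          rfl)
    rw [show ((0:Nat):Int) + 1 = 1 from by norm_num] at hpl
    rw [hpl, set_tableA]
    exact ih (m+1) (by omega)

lemma a_eq_rows (N P X : Int) (hN : 0 ≤ N) (hX : 0 ≤ X) :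
    countWaysToCompleteGame N P X = PySem.List.pyGetD (rows N X.toNat) P 0 := by
  show pvGet2 ((PySem.List.pyRange 1 (X+1) 1).foldl (fun dp move =>
      (PySem.List.pyRange 1 (N+1) 1).foldl (fun dp player =>
        (PySem.List.pyRange 1 (N+1) 1).foldl (fun dp other =>
          if pvCond player other
          then pvSet2 dp move player (pvGet2 dp move player + pvGet2 dp (move-1) other)
          else dp) (pvSet2 dp move player 0)) dp)
      ((PySem.List.pyRange 1 (N+1) 1).foldl (fun dp i => pvSet2 dp 0 i 1)
        ((PySem.List.pyRange 0 (X+1) 1).map (fun _ => List.replicate (N+1).toNat (0:Int)))))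
    X P = _
  set n := N.toNat with hn
  set x := X.toNat with hx
  have hdp0 : (PySem.List.pyRange 0 (X+1) 1).map (fun _ => List.replicate (N+1).toNat (0:Int))
      = List.replicate (n+1) (0:Int) :: (List.range x).map (fun _ => List.replicate (n+1) (0:Int)) := by
    rw [PySem.List.pyRange_one 0 (X+1), List.map_map]
    rw [show (X+1-0).toNat = x+1 from by omega, show (N+1).toNat = n+1 from by omega]
    rw [List.range_succ_eq_map, List.map_cons, List.map_map]
    rfl
  rw [hdp0]
  rw [foldl_head_set]
  have hrow0 : (PySem.List.pyRange 1 (N+1) 1).foldl (fun r i => PySem.List.pySetD r i 1)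
      (List.replicate (n+1) (0:Int)) = (0:Int) :: List.replicate n 1 := by
    have h0 := initRow N hN n 0 (by omega)
    rw [show ((0:Nat):Int) + 1 = 1 from by norm_num] at h0
    rw [show List.replicate (n+1) (0:Int)
        = (0:Int) :: (List.replicate 0 1 ++ List.replicate (n-0) 0) from by
      rw [List.replicate_succ]; rfl]
    exact h0
  rw [hrow0]
  have htable : ((0:Int) :: List.replicate n 1) :: (List.range x).map
      (fun _ => List.replicate (n+1) (0:Int)) = tableA N x 0 := by
    unfold tableA
    rw [List.range_succ_eq_map, List.map_cons, List.map_map, if_pos (le_refl 0)]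
    congr 1
  rw [htable]
  have hml := moveLoop N X hN hX x 0 (by omega)
  rw [show ((0:Nat):Int) + 1 = 1 from by norm_num] at hml
  rw [hml]
  unfold pvGet2
  have hXx : PySem.List.pyGetD (tableA N x x) X [] = rows N x := by
    rw [show X = ((x:Nat):Int) from by omega, PySem.List.pyGetD_natCast,
      tableA_getD N x x x (le_refl x), if_pos (le_refl x)]
  rw [hXx]

-- ---- B-side lemmas ----

-- the two inner-loop components, named for the proofs
def fT (N : Int) (v : List Int) (T : List Int) (d : Int) : List Int :=
  (PySem.List.pyRange d (N+1) d).foldl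
    (fun T m => PySem.List.pySetD T m (PySem.List.pyGetD T m 0 + PySem.List.pyGetD v d 0)) T

def fU (N : Int) (v : List Int) (U : List Int) (d : Int) : List Int :=
  (PySem.List.pyRange d (N+1) d).foldl
    (fun U m => PySem.List.pySetD U d (PySem.List.pyGetD U d 0 + PySem.List.pyGetD v m 0)) U

lemma pairwise_lt_pyRange_pos (a b : Int) {s : Int} (hs : 0 < s) :
    (PySem.List.pyRange a b s).Pairwise (· < ·) := by
  rw [PySem.List.pyRange_of_pos a b hs]
  refine List.pairwise_map.mpr ((List.pairwise_lt_range).imp ?_)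
  intro i j h
  have hm := mul_lt_mul_of_pos_left (show ((i:Int)) < (j:Int) by exact_mod_cast h) hs
  linarith

lemma setAdd_length (S : Int → Int) (L : List Int) (T : List Int) :
    (L.foldl (fun T m => PySem.List.pySetD T m (PySem.List.pyGetD T m 0 + S m)) T).length
      = T.length := by
  induction L generalizing T with
  | nil => rfl
  | cons m L ih => rw [List.foldl_cons, ih, PySem.List.length_pySetD]

-- fold of "add S m at index m" over a strictly increasing list of in-range indices
lemma foldl_setAdd (S : Int → Int) (L : List Int) :
    ∀ (T : List Int), L.Pairwise (· < ·) → (∀ x ∈ L, 0 ≤ x ∧ x.toNat < T.length) →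
    ∀ j : Nat,
    PySem.List.pyGetD
      (L.foldl (fun T m => PySem.List.pySetD T m (PySem.List.pyGetD T m 0 + S m)) T) (j:Int) 0
    = PySem.List.pyGetD T (j:Int) 0 + (if (j:Int) ∈ L then S (j:Int) else 0) := by
  induction L with
  | nil => intro T _ _ j; simp
  | cons m L ih =>
    intro T hpw hbd j
    obtain ⟨hm0, hmlen⟩ := hbd m (by simp)
    have hmc : m = ((m.toNat : Nat) : Int) := by omega
    rw [List.foldl_cons]
    have hlen1 : (PySem.List.pySetD T m (PySem.List.pyGetD T m 0 + S m)).length = T.length :=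
      PySem.List.length_pySetD T m _
    rw [ih _ (List.Pairwise.of_cons hpw)
      (fun x hx => by rw [hlen1]; exact hbd x (by simp [hx])) j]
    have hget : PySem.List.pyGetD (PySem.List.pySetD T m (PySem.List.pyGetD T m 0 + S m)) (j:Int) 0
        = if j = m.toNat then PySem.List.pyGetD T m 0 + S m else PySem.List.pyGetD T (j:Int) 0 := by
      rw [hmc]
      exact PySem.List.pyGetD_pySetD_natCast T m.toNat j _ 0 (by omega)
    rw [hget]
    by_cases hjm : j = m.toNat
    · have hje : (j:Int) = m := by omega
      have hnotL : (j:Int) ∉ L := by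
        intro hmem
        have := (List.pairwise_cons.mp hpw).1 _ hmem
        omega
      rw [if_pos hjm, if_neg hnotL, if_pos (by rw [hje]; exact List.mem_cons_self), hje]
      ring
    · have hje : (j:Int) ≠ m := by omega
      rw [if_neg hjm]
      have hif : (if (j:Int) ∈ m :: L then S (j:Int) else 0)
          = (if (j:Int) ∈ L then S (j:Int) else 0) := by
        simp [List.mem_cons, hje]
      rw [hif]

-- repeated accumulation at one fixed index collapses to a single write of the sum
lemma foldl_accAt (d : Int) (g : Int → Int) (L : List Int) :
    ∀ (U : List Int), 0 ≤ d → d.toNat < U.length →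
    L.foldl (fun U m => PySem.List.pySetD U d (PySem.List.pyGetD U d 0 + g m)) U
    = PySem.List.pySetD U d (PySem.List.pyGetD U d 0 + (L.map g).sum) := by
  induction L with
  | nil =>
    intro U hd hdl
    rw [List.foldl_nil, List.map_nil, List.sum_nil, add_zero,
      PySem.List.pySetD_of_nonneg _ _ hd, PySem.List.pyGetD_of_nonneg _ _ hd,
      List.getD_eq_getElem _ _ hdl, List.set_getElem_self]
  | cons m L ih =>
    intro U hd hdl
    rw [List.foldl_cons, ih _ hd (by rw [PySem.List.length_pySetD]; exact hdl)]
    have hdc : d = ((d.toNat : Nat) : Int) := by omega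
    have hget : PySem.List.pyGetD (PySem.List.pySetD U d (PySem.List.pyGetD U d 0 + g m)) d 0
        = PySem.List.pyGetD U d 0 + g m := by
      rw [hdc]
      rw [PySem.List.pyGetD_pySetD_natCast U d.toNat d.toNat _ 0 (by omega), if_pos rfl]
    have hset : ∀ w w' : Int, PySem.List.pySetD (PySem.List.pySetD U d w) d w'
        = PySem.List.pySetD U d w' := by
      intro w w'
      rw [hdc, PySem.List.pySetD_natCast, PySem.List.pySetD_natCast, PySem.List.pySetD_natCast,
        List.set_set]
    rw [hget, hset, List.map_cons, List.sum_cons]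
    ring_nf

lemma mem_pyRange_step (d x N : Int) (hd : 1 ≤ d) :
    x ∈ PySem.List.pyRange d (N+1) d ↔ d ≤ x ∧ x < N+1 ∧ d ∣ x := by
  rw [PySem.List.mem_pyRange_iff_of_pos (by omega)]
  constructor
  · rintro ⟨h1, h2, h3⟩
    refine ⟨h1, h2, ?_⟩
    have h4 := dvd_add h3 (dvd_refl d)
    simpa using h4
  · rintro ⟨h1, h2, h3⟩
    exact ⟨h1, h2, dvd_sub h3 (dvd_refl d)⟩

lemma fT_fold_getD (N : Int) (v : List Int) (R : List Int)
    (hR : ∀ d ∈ R, 1 ≤ d) :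
    ∀ (T : List Int), T.length = N.toNat + 1 → ∀ j : Nat, j ≤ N.toNat →
    PySem.List.pyGetD (R.foldl (fT N v) T) (j:Int) 0
    = PySem.List.pyGetD T (j:Int) 0
      + ((R.filter (fun d => decide ((j:Int) ∈ PySem.List.pyRange d (N+1) d))).map
          (fun d => PySem.List.pyGetD v d 0)).sum := by
  induction R with
  | nil => intro T _ j _; simp
  | cons d R ih =>
    intro T hT j hj
    have hd1 : 1 ≤ d := hR d (by simp)
    rw [List.foldl_cons]
    have hTd : (fT N v T d).length = N.toNat + 1 := by
      unfold fT; rw [setAdd_length]; exact hT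
    rw [ih (fun x hx => hR x (by simp [hx])) _ hTd j hj]
    have hfT : PySem.List.pyGetD (fT N v T d) (j:Int) 0
        = PySem.List.pyGetD T (j:Int) 0
          + (if (j:Int) ∈ PySem.List.pyRange d (N+1) d then PySem.List.pyGetD v d 0 else 0) := by
      unfold fT
      exact foldl_setAdd (fun _ => PySem.List.pyGetD v d 0) _ T
        (pairwise_lt_pyRange_pos d (N+1) (by omega))
        (fun x hx => by
          rw [mem_pyRange_step d x N hd1] at hx
          constructor
          · omega
          · rw [hT]; omega) j
    rw [hfT]
    by_cases hmem : (j:Int) ∈ PySem.List.pyRange d (N+1) d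
    · rw [if_pos hmem, List.filter_cons_of_pos (by simpa using hmem), List.map_cons,
        List.sum_cons]
      ring
    · rw [if_neg hmem, List.filter_cons_of_neg (by simpa using hmem), add_zero]

lemma fU_closed (N : Int) (v : List Int) (U : List Int) (d : Int)
    (hd : 1 ≤ d) (hdl : d.toNat < U.length) :
    fU N v U d = PySem.List.pySetD U d (PySem.List.pyGetD U d 0
      + ((PySem.List.pyRange d (N+1) d).map (fun m => PySem.List.pyGetD v m 0)).sum) := by
  unfold fU
  exact foldl_accAt d (fun m => PySem.List.pyGetD v m 0) _ U (by omega) hdl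

lemma foldl_fU_closed (N : Int) (v : List Int) (R : List Int) :
    ∀ (U : List Int), (∀ d ∈ R, 1 ≤ d ∧ d.toNat < U.length) →
    R.foldl (fU N v) U
    = R.foldl (fun U d => PySem.List.pySetD U d (PySem.List.pyGetD U d 0
        + ((PySem.List.pyRange d (N+1) d).map (fun m => PySem.List.pyGetD v m 0)).sum)) U := by
  induction R with
  | nil => intro U _; rfl
  | cons d R ih =>
    intro U hbd
    obtain ⟨hd1, hdl⟩ := hbd d (by simp)
    rw [List.foldl_cons, List.foldl_cons, fU_closed N v U d hd1 hdl]
    exact ih _ (fun x hx => by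
      rw [PySem.List.length_pySetD]
      exact hbd x (by simp [hx]))

lemma fU_fold_getD (N : Int) (v : List Int) (hN : 0 ≤ N) (U : List Int)
    (hU : U.length = N.toNat + 1) (j : Nat) :
    PySem.List.pyGetD ((PySem.List.pyRange 1 (N+1) 1).foldl (fU N v) U) (j:Int) 0
    = PySem.List.pyGetD U (j:Int) 0
      + (if (j:Int) ∈ PySem.List.pyRange 1 (N+1) 1
         then ((PySem.List.pyRange (j:Int) (N+1) (j:Int)).map
            (fun m => PySem.List.pyGetD v m 0)).sum
         else 0) := by
  rw [foldl_fU_closed N v (PySem.List.pyRange 1 (N+1) 1) U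
    (fun d hd => by
      have h := (PySem.List.mem_pyRange_one).mp hd
      exact ⟨h.1, by rw [hU]; omega⟩)]
  exact foldl_setAdd
    (fun d => ((PySem.List.pyRange d (N+1) d).map (fun m => PySem.List.pyGetD v m 0)).sum)
    _ U (PySem.List.pairwise_lt_pyRange_one 1 (N+1))
    (fun x hx => by
      rw [PySem.List.mem_pyRange_one] at hx
      constructor
      · omega
      · rw [hU]; omega) j

-- multiples of p inside 1..N, as a filtered range (two strictly sorted lists, same members)
lemma pyRange_step_eq_filter (N p : Int) (hp : 1 ≤ p) :
    PySem.List.pyRange p (N+1) p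
      = (PySem.List.pyRange 1 (N+1) 1).filter (fun q => decide (p ∣ q)) := by
  have h1 : (PySem.List.pyRange p (N+1) p).Pairwise (· < ·) :=
    pairwise_lt_pyRange_pos p (N+1) (by omega)
  have h2 : ((PySem.List.pyRange 1 (N+1) 1).filter (fun q => decide (p ∣ q))).Pairwise (· < ·) :=
    List.Pairwise.filter _ (PySem.List.pairwise_lt_pyRange_one 1 (N+1))
  have hmem : ∀ x : Int, x ∈ PySem.List.pyRange p (N+1) p
      ↔ x ∈ (PySem.List.pyRange 1 (N+1) 1).filter (fun q => decide (p ∣ q)) := by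
    intro x
    rw [mem_pyRange_step p x N hp, List.mem_filter, PySem.List.mem_pyRange_one]
    constructor
    · rintro ⟨ha, hb, hc⟩; exact ⟨⟨by omega, hb⟩, by simpa using hc⟩
    · rintro ⟨⟨ha, hb⟩, hc⟩
      have hdvd : p ∣ x := by simpa using hc
      exact ⟨Int.le_of_dvd (by omega) hdvd, hb, hdvd⟩
  have hnd1 : (PySem.List.pyRange p (N+1) p).Nodup := h1.imp ne_of_lt
  have hnd2 : ((PySem.List.pyRange 1 (N+1) 1).filter (fun q => decide (p ∣ q))).Nodup :=
    h2.imp ne_of_lt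
  have hperm := (List.perm_ext_iff_of_nodup hnd1 hnd2).mpr hmem
  exact hperm.eq_of_pairwise (fun a b _ _ h h' => absurd h' (lt_asymm h)) h1 h2

-- split the neighbour sum: divisors + multiples - twice the self term
lemma filter_cond_split (p : Int) (g : Int → Int) (L : List Int) :
    L.Nodup → 1 ≤ p → (∀ q ∈ L, 1 ≤ q) →
    ((L.filter (fun q => pvCond p q)).map g).sum
    = ((L.filter (fun q => decide (q ∣ p))).map g).sum
      + ((L.filter (fun q => decide (p ∣ q))).map g).sum
      - 2 * (if p ∈ L then g p else 0) := by
  induction L with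
  | nil => intro _ _ _; simp
  | cons q L ih =>
    intro hnd hp hpos
    have hq1 : 1 ≤ q := hpos q (by simp)
    have ihL := ih (List.Nodup.of_cons hnd) hp (fun x hx => hpos x (by simp [hx]))
    have hmodb : ∀ a b : Int, (PySem.Int.mod a b == 0) = decide (b ∣ a) := by
      intro a b
      by_cases h : b ∣ a
      · simp [h, (PySem.Int.mod_eq_zero_iff_dvd a b).mpr h]
      · have hne : PySem.Int.mod a b ≠ 0 := fun hc => h ((PySem.Int.mod_eq_zero_iff_dvd a b).mp hc)
        simp [h, hne]
    have hcond : pvCond p q = (decide (p ≠ q) && (decide (q ∣ p) || decide (p ∣ q))) := by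
      unfold pvCond
      rw [hmodb, hmodb]
    by_cases hqp : q = p
    · subst hqp
      have hqnotL : q ∉ L := (List.nodup_cons.mp hnd).1
      rw [List.filter_cons_of_neg (by simp [hcond]),
        List.filter_cons_of_pos (by simp),
        List.filter_cons_of_pos (by simp),
        List.map_cons, List.sum_cons, List.map_cons, List.sum_cons,
        if_pos List.mem_cons_self, ihL, if_neg hqnotL]
      ring
    · have hpqne : p ≠ q := fun h => hqp h.symm
      have hmemq : (if p ∈ q :: L then g p else 0) = (if p ∈ L then g p else 0) := by
        simp [List.mem_cons, hpqne]
      by_cases hdp : q ∣ p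
      · by_cases hpq : p ∣ q
        · exact absurd (Int.dvd_antisymm (by omega) (by omega) hpq hdp) (fun h => hqp h.symm)
        · rw [List.filter_cons_of_pos (by simp [hcond, hdp, hpqne]),
            List.filter_cons_of_pos (by simp [hdp]),
            List.filter_cons_of_neg (by simp [hpq]),
            List.map_cons, List.sum_cons, List.map_cons, List.sum_cons, hmemq, ihL]
          ring
      · by_cases hpq : p ∣ q
        · rw [List.filter_cons_of_pos (by simp [hcond, hpq, hpqne]),
            List.filter_cons_of_neg (by simp [hdp]),
            List.filter_cons_of_pos (by simp [hpq]),
            List.map_cons, List.sum_cons, List.map_cons, List.sum_cons, hmemq, ihL]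
          ring
        · rw [List.filter_cons_of_neg (by simp [hcond, hdp, hpq, hpqne]),
            List.filter_cons_of_neg (by simp [hdp]),
            List.filter_cons_of_neg (by simp [hpq]), hmemq, ihL]

lemma getD_replicate_zero (n : Nat) (j : Nat) :
    PySem.List.pyGetD (List.replicate n (0:Int)) (j:Int) 0 = 0 := by
  rw [PySem.List.pyGetD_natCast]
  rcases lt_or_ge j n with h | h
  · rw [List.getD_eq_getElem _ _ (by simpa using h)]; simp
  · rw [List.getD_eq_default _ _ (by simpa using h)]

-- the sieve move IS the DP move
lemma moveB_eq_stepRow (N : Int) (hN : 0 ≤ N) (v : List Int) :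
    pvMoveB N v = stepRow N v := by
  unfold pvMoveB stepRow
  have hsplit : (fun (TU : List Int × List Int) d =>
        (PySem.List.pyRange d (N+1) d).foldl (fun TU m =>
          (PySem.List.pySetD TU.1 m (PySem.List.pyGetD TU.1 m 0 + PySem.List.pyGetD v d 0),
           PySem.List.pySetD TU.2 d (PySem.List.pyGetD TU.2 d 0 + PySem.List.pyGetD v m 0))) TU)
      = (fun TU d => (fT N v TU.1 d, fU N v TU.2 d)) := by
    funext TU d
    exact PySem.List.foldl_prod_mk
      (fun T m => PySem.List.pySetD T m (PySem.List.pyGetD T m 0 + PySem.List.pyGetD v d 0))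
      (fun U m => PySem.List.pySetD U d (PySem.List.pyGetD U d 0 + PySem.List.pyGetD v m 0))
      _ TU.1 TU.2
  rw [hsplit,
    PySem.List.foldl_prod_mk (f := fT N v) (g := fU N v)]
  refine congrArg (List.cons (0:Int)) (List.map_congr_left ?_)
  intro p hp
  change PySem.List.pyGetD (List.foldl (fT N v) _ _) p 0
      + PySem.List.pyGetD (List.foldl (fU N v) _ _) p 0
      - 2 * PySem.List.pyGetD v p 0 = _
  rw [PySem.List.mem_pyRange_one] at hp
  have hp1 : 1 ≤ p := hp.1
  have hpN : p < N + 1 := hp.2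
  have hrep : (N+1).toNat = N.toNat + 1 := by omega
  have hpc : p = ((p.toNat : Nat) : Int) := by omega
  -- T part
  have hT := fT_fold_getD N v (PySem.List.pyRange 1 (N+1) 1)
    (fun d hd => ((PySem.List.mem_pyRange_one).mp hd).1)
    (List.replicate (N+1).toNat 0) (by rw [List.length_replicate]; omega)
    p.toNat (by omega)
  rw [getD_replicate_zero, zero_add, ← hpc] at hT
  -- U part
  have hUlen : (List.replicate (N+1).toNat (0:Int)).length = N.toNat + 1 := by
    rw [List.length_replicate]; omega
  have hU := fU_fold_getD N v hN (List.replicate (N+1).toNat 0) hUlen p.toNat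
  rw [getD_replicate_zero, zero_add, ← hpc] at hU
  rw [if_pos ((PySem.List.mem_pyRange_one).mpr ⟨hp1, hpN⟩)] at hU
  rw [hT, hU]
  -- turn the T-filter condition into divisibility
  have hTfilter : (PySem.List.pyRange 1 (N+1) 1).filter
        (fun d => decide (p ∈ PySem.List.pyRange d (N+1) d))
      = (PySem.List.pyRange 1 (N+1) 1).filter (fun d => decide (d ∣ p)) := by
    apply List.filter_congr
    intro d hd
    have hd1 : 1 ≤ d := ((PySem.List.mem_pyRange_one).mp hd).1
    simp only [decide_eq_decide]
    rw [mem_pyRange_step d p N hd1]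
    constructor
    · rintro ⟨_, _, h⟩; exact h
    · intro h; exact ⟨Int.le_of_dvd (by omega) h, hpN, h⟩
  rw [hTfilter, pyRange_step_eq_filter N p hp1]
  rw [filter_cond_split p (fun q => PySem.List.pyGetD v q 0) (PySem.List.pyRange 1 (N+1) 1)
    ((PySem.List.pairwise_lt_pyRange_one 1 (N+1)).imp ne_of_lt) hp1
    (fun q hq => ((PySem.List.mem_pyRange_one).mp hq).1),
    if_pos ((PySem.List.mem_pyRange_one).mpr ⟨hp1, hpN⟩)]

lemma foldl_const_iterate {a b : Type} (l : List a) (F : b → b) (init : b) :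
    l.foldl (fun r _ => F r) init = F^[l.length] init := by
  induction l generalizing init with
  | nil => rfl
  | cons x l ih => simp [List.foldl_cons, ih, Function.iterate_succ_apply]

lemma iterate_moveB_rows (N : Int) (hN : 0 ≤ N) (m : Nat) :
    (pvMoveB N)^[m] ((0:Int) :: List.replicate N.toNat 1) = rows N m := by
  induction m with
  | zero => rfl
  | succ m ih =>
    rw [Function.iterate_succ_apply', ih]
    rw [moveB_eq_stepRow N hN (rows N m)]
    rfl

lemma alt_eq_rows (N P X : Int) (hN : 0 ≤ N) (hX : 0 ≤ X) :
    countWaysToCompleteGame_alt N P X = PySem.List.pyGetD (rows N X.toNat) P 0 := by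
  show PySem.List.pyGetD ((PySem.List.pyRange 0 X 1).foldl (fun v _ => pvMoveB N v)
    ((0:Int) :: List.replicate N.toNat 1)) P 0 = _
  rw [foldl_const_iterate, PySem.List.length_pyRange_one,
    show (X - 0).toNat = X.toNat from by omega,
    iterate_moveB_rows N hN X.toNat]

-- ===== VERDICT (by name: the statement is the Claim_ definition above) =====
theorem countWaysToCompleteGame_spec : Claim_equal_countWaysToCompleteGame := by
  intro N P X _hD hPre
  obtain ⟨hN, hX, _, _⟩ := hPre
  show countWaysToCompleteGame N P X = countWaysToCompleteGame_alt N P X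
  rw [a_eq_rows N P X hN hX, alt_eq_rows N P X hN hX]
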